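-- pv_equiv track=rewrite | github.com/dxtaner/Python | cardPackets.py | kartPaketleri
-- ===== SOURCE A (Python) =====
-- def kartPaketleri(kartTipleri):
--     sonuc = len(kartTipleri)
--     enBuyukSayi = max(kartTipleri)
--
--     sayac = [0] * (enBuyukSayi + 1)
--
--     # Kart tiplerinin sayısını sayan bir dizi oluşturun
--     for i in range(len(kartTipleri)):
--         sayac[kartTipleri[i]] += 1
--
--     # Minimum ek kart sayısını hesaplamak için işlem yapın
--     for basamak in range(2, enBuyukSayi + 1):
--         geciciSonuc = 0
--         i = 0
--         while i <= enBuyukSayi and geciciSonuc < sonuc: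
--             # Kart türlerini eşit sayıda paketlemek için ek kart sayısını hesaplayın
--             geciciSonuc += sayac[i] * ((basamak - (i % basamak)) % basamak)
--             i += 1
--         sonuc = min(sonuc, geciciSonuc)
--
--     return sonuc
-- ===== SOURCE B (Python) =====
-- def kartPaketleri(kartTipleri):
--     # cost(b) = b * (sum of per-card ceilings) - (sum of stored values); the
--     # ceiling sum is read off a suffix-count table at the multiples of b only,
--     # so the work over all pack sizes is harmonic instead of quadratic.
--     n = len(kartTipleri)
--     enBuyukSayi = max(kartTipleri)
--     sayac = [0] * (enBuyukSayi + 1)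
--     for v in kartTipleri:
--         sayac[v] += 1
--     # kacTane[x] = how many cards landed in a slot >= x
--     kacTane = [0] * (enBuyukSayi + 2)
--     for x in range(enBuyukSayi, 0, -1):
--         kacTane[x] = kacTane[x + 1] + sayac[x]
--     toplam = sum(x * sayac[x] for x in range(1, enBuyukSayi + 1))
--     sonuc = n
--     for basamak in range(2, enBuyukSayi + 1):
--         ceilToplam = 0
--         for t in range(0, enBuyukSayi, basamak):
--             ceilToplam += kacTane[t + 1]
--         sonuc = min(sonuc, basamak * ceilToplam - toplam)
--     return sonuc
-- ===== Notes on version B (the rewrite author's own statement) =====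
-- stated objective: alternative
-- what changed: Instead of scanning every slot 0..max for every pack size (with an early exit), B builds one suffix-count table over the counting array and, for each pack size b, sums it only at the multiples of b, using cost(b) = b*sum(ceil(v/b)) - sum(v); Pre_ excludes only inputs on which A raises (empty list, max < 0, or an element below -(max+1)).
import Mathlib
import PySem

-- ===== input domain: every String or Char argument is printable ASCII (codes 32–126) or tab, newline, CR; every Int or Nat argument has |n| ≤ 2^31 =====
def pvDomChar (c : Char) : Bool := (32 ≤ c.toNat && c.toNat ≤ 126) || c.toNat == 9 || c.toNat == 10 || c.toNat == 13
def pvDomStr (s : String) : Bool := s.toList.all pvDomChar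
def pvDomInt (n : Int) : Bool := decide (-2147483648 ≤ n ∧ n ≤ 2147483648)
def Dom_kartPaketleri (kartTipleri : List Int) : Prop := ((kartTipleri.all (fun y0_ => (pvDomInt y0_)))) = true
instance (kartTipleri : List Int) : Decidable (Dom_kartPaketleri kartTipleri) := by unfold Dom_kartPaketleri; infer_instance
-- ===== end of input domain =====

-- B replaces A's full 0..max scan per pack size (with early exit) by one suffix-count
-- table read only at the multiples of each pack size: cost(b) = b*sum(ceil(v/b)) - sum(v).

-- ===== PORT A =====
-- the 'while i <= enBuyukSayi and geciciSonuc < sonuc' loop; fuel bounds the iteration count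
def pvWhileA (sayac : List Int) (M basamak sonuc : Int) : Nat → Int → Int → Int
  | 0, _, gecici => gecici
  | fuel + 1, i, gecici =>
    if i ≤ M ∧ gecici < sonuc then
      pvWhileA sayac M basamak sonuc fuel (i + 1)
        (gecici + PySem.List.pyGetD sayac i 0 *
          PySem.Int.mod (basamak - PySem.Int.mod i basamak) basamak)
    else gecici

def kartPaketleri (kartTipleri : List Int) : Int :=
  match PySem.List.max? kartTipleri (fun y => y) with
  | none => 0  -- Python: max([]) raises ValueError; excluded by Pre_
  | some enBuyukSayi =>
    let sonuc : Int := kartTipleri.length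
    let sayac : List Int := PySem.List.pyRepeat [0] (enBuyukSayi + 1)
    -- for i in range(len(kartTipleri)): sayac[kartTipleri[i]] += 1   (Python index semantics)
    let sayac : List Int :=
      (PySem.List.pyRange 0 (kartTipleri.length : Int)).foldl
        (fun s j =>
          PySem.List.pySetD s (PySem.List.pyGetD kartTipleri j 0)
            (PySem.List.pyGetD s (PySem.List.pyGetD kartTipleri j 0) 0 + 1)) sayac
    (PySem.List.pyRange 2 (enBuyukSayi + 1)).foldl
      (fun sonuc basamak =>
        min sonuc (pvWhileA sayac enBuyukSayi basamak sonuc (enBuyukSayi + 2).toNat 0 0))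
      sonuc

-- ===== PORT B =====
def kartPaketleri_alt (kartTipleri : List Int) : Int :=
  match PySem.List.max? kartTipleri (fun y => y) with
  | none => 0  -- Python: max([]) raises ValueError; excluded by Pre_
  | some enBuyukSayi =>
    let n : Int := kartTipleri.length
    let sayac : List Int := PySem.List.pyRepeat [0] (enBuyukSayi + 1)
    -- for v in kartTipleri: sayac[v] += 1   (Python index semantics)
    let sayac : List Int :=
      kartTipleri.foldl
        (fun s v => PySem.List.pySetD s v (PySem.List.pyGetD s v 0 + 1)) sayac
    let kacTane : List Int := PySem.List.pyRepeat [0] (enBuyukSayi + 2)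
    let kacTane : List Int :=
      (PySem.List.pyRange enBuyukSayi 0 (-1)).foldl
        (fun g x =>
          PySem.List.pySetD g x
            (PySem.List.pyGetD g (x + 1) 0 + PySem.List.pyGetD sayac x 0)) kacTane
    let toplam : Int :=
      (PySem.List.pyRange 1 (enBuyukSayi + 1)).foldl
        (fun a x => a + x * PySem.List.pyGetD sayac x 0) 0
    (PySem.List.pyRange 2 (enBuyukSayi + 1)).foldl
      (fun sonuc basamak =>
        min sonuc (basamak *
          ((PySem.List.pyRange 0 enBuyukSayi basamak).foldl
            (fun acc t => acc + PySem.List.pyGetD kacTane (t + 1) 0) 0) - toplam))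
      n

-- ===== PRECONDITION & SPEC =====
def pvMaxD (l : List Int) : Int := (PySem.List.max? l (fun y => y)).getD 0

-- Exactly the inputs on which the Python A returns normally: a nonempty list whose maximum is
-- nonnegative and whose every element is ≥ -(max+1); otherwise max([]) raises ValueError or
-- sayac[v] raises IndexError.
def Pre_kartPaketleri (kartTipleri : List Int) : Prop :=
  kartTipleri ≠ [] ∧ 0 ≤ pvMaxD kartTipleri ∧
    ∀ v ∈ kartTipleri, -(pvMaxD kartTipleri + 1) ≤ v

instance (kartTipleri : List Int) : Decidable (Pre_kartPaketleri kartTipleri) := by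
  unfold Pre_kartPaketleri; infer_instance

def pvWitness_kartPaketleri : List Int := [1, 2, 3]

def Spec_kartPaketleri (kartTipleri : List Int) (out : Int) : Prop :=
  out = kartPaketleri_alt kartTipleri

instance (kartTipleri : List Int) (out : Int) : Decidable (Spec_kartPaketleri kartTipleri out) := by
  unfold Spec_kartPaketleri; infer_instance

-- ===== CLAIM (what is proved, stated in full; the proofs are below) =====
def Claim_equal_kartPaketleri : Prop := ∀ (kartTipleri : List Int), Dom_kartPaketleri kartTipleri → Pre_kartPaketleri kartTipleri → Spec_kartPaketleri kartTipleri (kartPaketleri kartTipleri)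

-- ===== LEMMAS AND PROOFS =====

-- sum over a Nodup list of a "delta at v" map
lemma pv_sum_ite (T : List Int) (c : Int → Int) (v : Int) (hnd : T.Nodup) (hv : v ∈ T) :
    (T.map (fun k => if k = v then c k else 0)).sum = c v := by
  induction T with
  | nil => cases hv
  | cons a T ih =>
    simp only [List.map_cons, List.sum_cons]
    by_cases hav : a = v
    · subst hav
      have hz : (T.map (fun k => if k = a then c k else 0)).sum = 0 := by
        apply List.sum_eq_zero
        intro x hx
        rcases List.mem_map.mp hx with ⟨k, hk, rfl⟩
        have hne : k ≠ a := fun e => (List.nodup_cons.mp hnd).1 (e ▸ hk)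
        simp [hne]
      simp [hz]
    · have h' : v ∈ T := by
        rcases List.mem_cons.mp hv with h | h
        · exact absurd h.symm hav
        · exact h
      rw [if_neg hav, ih (List.nodup_cons.mp hnd).2 h']; ring

-- regrouping a sum over values into a sum over a covering Nodup index list weighted by counts
lemma pv_regroup (l T : List Int) (f : Int → Int) (hnd : T.Nodup) (hcov : ∀ v ∈ l, v ∈ T) :
    (T.map (fun k => (l.count k : Int) * f k)).sum = (l.map f).sum := by
  induction l with
  | nil => simp
  | cons v l ih =>
    have hstep : T.map (fun k => (((v :: l).count k : Nat) : Int) * f k)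
        = T.map (fun k => ((l.count k : Int) * f k) + (if k = v then f k else 0)) := by
      apply List.map_congr_left
      intro k _
      have : (v :: l).count k = l.count k + if k = v then 1 else 0 := by
        rw [List.count_cons]
        congr 1
        rcases eq_or_ne k v with h | h
        · simp [h]
        · simp [h, Ne.symm h]
      rw [this]
      push_cast
      split <;> ring
    rw [hstep, PySem.List.sum_map_add_int,
      ih (fun w hw => hcov w (List.mem_cons_of_mem _ hw)),
      pv_sum_ite T f v hnd (hcov v (List.mem_cons_self))]
    simp [add_comm]

-- sum of counts over a Nodup list is countP of membership
lemma pv_sum_count (l T : List Int) (hnd : T.Nodup) :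
    (T.map (fun k => (l.count k : Int))).sum = (l.countP (fun v => decide (v ∈ T)) : Int) := by
  induction l with
  | nil => simp
  | cons v l ih =>
    have hstep : T.map (fun k => (((v :: l).count k : Nat) : Int))
        = T.map (fun k => ((l.count k : Int)) + (if k = v then (1 : Int) else 0)) := by
      apply List.map_congr_left
      intro k _
      have : (v :: l).count k = l.count k + if k = v then 1 else 0 := by
        rw [List.count_cons]
        congr 1
        rcases eq_or_ne k v with h | h
        · simp [h]
        · simp [h, Ne.symm h]
      rw [this]; push_cast; ring
    have hone : (T.map (fun k => if k = v then (1 : Int) else 0)).sum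
        = if v ∈ T then (1 : Int) else 0 := by
      by_cases hvT : v ∈ T
      · rw [pv_sum_ite T (fun _ => (1 : Int)) v hnd hvT, if_pos hvT]
      · rw [if_neg hvT]
        apply List.sum_eq_zero
        intro x hx
        rcases List.mem_map.mp hx with ⟨k, hk, rfl⟩
        have hne : k ≠ v := fun e => hvT (e ▸ hk)
        simp [hne]
    rw [hstep, PySem.List.sum_map_add_int, ih, hone, List.countP_cons]
    by_cases hvT : v ∈ T
    · simp [hvT]
    · simp [hvT]

-- double-count swap
lemma pv_swap (T l : List Int) (p : Int → Int → Bool) :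
    (T.map (fun t => (l.countP (p t) : Int))).sum
      = (l.map (fun v => (T.countP (fun t => p t v) : Int))).sum := by
  induction T with
  | nil => simp
  | cons t T ih =>
    simp only [List.map_cons, List.sum_cons]
    have hstep : l.map (fun v => ((T.countP (fun t' => p t' v) : Nat) : Int)
          + (if p t v then (1 : Int) else 0))
        = l.map (fun v => (((t :: T).countP (fun t' => p t' v) : Nat) : Int)) := by
      apply List.map_congr_left
      intro v _
      rw [List.countP_cons]
      push_cast
      split <;> simp
    rw [ih, ← hstep, PySem.List.sum_map_add_int]
    have := PySem.List.sum_map_ite_one_zero (fun v => p t v) l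
    rw [this]
    ring

-- Python's negative-index wraparound: for -n <= i < n the index i % n addresses the same slot
lemma pv_idx_wrap (n : Nat) (i : Int) (h1 : -(n : Int) ≤ i) (h2 : i < (n : Int)) :
    PySem.List.pyIdx? n (PySem.Int.mod i (n : Int)) = PySem.List.pyIdx? n i := by
  have hn : (0 : Int) < (n : Int) := by omega
  have hmod : PySem.Int.mod i (n : Int) = if 0 ≤ i then i else i + n := by
    rw [PySem.Int.mod_eq_emod_of_pos hn]
    split_ifs with h0
    · exact Int.emod_eq_of_lt h0 h2
    · have h : (i + n) % (n : Int) = i % n := by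
        simp
      rw [← h]
      exact Int.emod_eq_of_lt (by omega) (by omega)
  by_cases h0 : 0 ≤ i
  · rw [hmod, if_pos h0]
  · rw [hmod, if_neg h0]
    unfold PySem.List.pyIdx?
    rw [if_pos (by omega : 0 ≤ i + n), if_pos (by omega : i + (n : Int) < (n : Int)),
      if_neg h0, if_pos (by omega : -(n : Int) ≤ i)]
    congr 1
    omega

lemma pv_get_wrap (xs : List Int) (i : Int) (h1 : -(xs.length : Int) ≤ i)
    (h2 : i < (xs.length : Int)) :
    PySem.List.pyGetD xs (PySem.Int.mod i (xs.length : Int)) 0 = PySem.List.pyGetD xs i 0 := by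
  unfold PySem.List.pyGetD PySem.List.pyGet?
  rw [pv_idx_wrap xs.length i h1 h2]

lemma pv_set_wrap (xs : List Int) (i x : Int) (h1 : -(xs.length : Int) ≤ i)
    (h2 : i < (xs.length : Int)) :
    PySem.List.pySetD xs (PySem.Int.mod i (xs.length : Int)) x = PySem.List.pySetD xs i x := by
  unfold PySem.List.pySetD PySem.List.pySet?
  rw [pv_idx_wrap xs.length i h1 h2]

-- the counting loop only sees each value through its wrapped slot
lemma pv_fold_wrap (L : Int) (l : List Int) (hL : ∀ v ∈ l, -L ≤ v ∧ v < L) :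
    ∀ acc : List Int, (acc.length : Int) = L →
      l.foldl (fun s v => PySem.List.pySetD s v (PySem.List.pyGetD s v 0 + 1)) acc
        = (l.map (fun v => PySem.Int.mod v L)).foldl
            (fun s v => PySem.List.pySetD s v (PySem.List.pyGetD s v 0 + 1)) acc := by
  induction l with
  | nil => intro acc _; rfl
  | cons v l ih =>
    intro acc hacc
    obtain ⟨hv1, hv2⟩ := hL v List.mem_cons_self
    simp only [List.map_cons, List.foldl_cons]
    have hstep : PySem.List.pySetD acc (PySem.Int.mod v L)
          (PySem.List.pyGetD acc (PySem.Int.mod v L) 0 + 1)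
        = PySem.List.pySetD acc v (PySem.List.pyGetD acc v 0 + 1) := by
      rw [← hacc] at hv1 hv2
      rw [← hacc, pv_get_wrap acc v hv1 hv2, pv_set_wrap acc v _ hv1 hv2]
    rw [hstep, ih (fun w hw => hL w (List.mem_cons_of_mem _ hw)) _
      (by rw [PySem.List.length_pySetD]; exact hacc)]

-- characterization of the counting array
lemma pv_sayac (l : List Int) :
    ∀ (acc : List Int), (∀ v ∈ l, 0 ≤ v ∧ v < (acc.length : Int)) →
      (l.foldl (fun s v => PySem.List.pySetD s v (PySem.List.pyGetD s v 0 + 1)) acc).length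
          = acc.length ∧
      ∀ k : Int, 0 ≤ k → k < (acc.length : Int) →
        PySem.List.pyGetD
            (l.foldl (fun s v => PySem.List.pySetD s v (PySem.List.pyGetD s v 0 + 1)) acc) k 0
          = PySem.List.pyGetD acc k 0 + (l.count k : Int) := by
  induction l with
  | nil => intro acc _; simp
  | cons v l ih =>
    intro acc hbound
    obtain ⟨hv0, hvlen⟩ := hbound v List.mem_cons_self
    have hlen' : (PySem.List.pySetD acc v (PySem.List.pyGetD acc v 0 + 1)).length
        = acc.length := PySem.List.length_pySetD acc v _
    have hb' : ∀ w ∈ l, 0 ≤ w ∧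
        w < ((PySem.List.pySetD acc v (PySem.List.pyGetD acc v 0 + 1)).length : Int) := by
      intro w hw
      rw [hlen']
      exact hbound w (List.mem_cons_of_mem _ hw)
    obtain ⟨ihlen, ihget⟩ := ih _ hb'
    refine ⟨by simpa [hlen'] using ihlen, ?_⟩
    intro k hk0 hklen
    simp only [List.foldl_cons]
    rw [ihget k hk0 (by rw [hlen']; exact hklen)]
    have hvn : v = ((v.toNat : Nat) : Int) := (Int.toNat_of_nonneg hv0).symm
    have hkn : k = ((k.toNat : Nat) : Int) := (Int.toNat_of_nonneg hk0).symm
    have hsplit : PySem.List.pyGetD (PySem.List.pySetD acc v (PySem.List.pyGetD acc v 0 + 1)) k 0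
        = PySem.List.pyGetD acc k 0 + (if k = v then 1 else 0) := by
      rw [hvn, hkn,
        PySem.List.pyGetD_pySetD_natCast acc v.toNat k.toNat _ 0 (by omega)]
      by_cases hkv : k = v
      · rw [if_pos (by omega : k.toNat = v.toNat), ← hvn, ← hkn, if_pos hkv, hkv]

      · rw [if_neg (by omega : ¬ k.toNat = v.toNat), ← hkn, ← hvn, if_neg hkv]
        ring
    rw [hsplit]
    have hcnt : (v :: l).count k = l.count k + if k = v then 1 else 0 := by
      rw [List.count_cons]
      congr 1
      rcases eq_or_ne k v with h | h
      · simp [h]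
      · simp [h, Ne.symm h]
    rw [hcnt]
    push_cast
    split <;> ring

lemma pv_getD_nonneg (xs : List Int) (i : Int) (h : ∀ x ∈ xs, 0 ≤ x) :
    0 ≤ PySem.List.pyGetD xs i 0 := by
  unfold PySem.List.pyGetD
  cases hg : PySem.List.pyGet? xs i with
  | none => simp
  | some a =>
    simp only [Option.getD_some]
    unfold PySem.List.pyGet? at hg
    rcases Option.bind_eq_some_iff.mp hg with ⟨k, _, hk⟩
    exact h a (List.mem_of_getElem? hk)

lemma pv_getD_zero (xs : List Int) (i : Int) (h : ∀ x ∈ xs, x = 0) :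
    PySem.List.pyGetD xs i 0 = 0 := by
  unfold PySem.List.pyGetD
  cases hg : PySem.List.pyGet? xs i with
  | none => simp
  | some a =>
    simp only [Option.getD_some]
    unfold PySem.List.pyGet? at hg
    rcases Option.bind_eq_some_iff.mp hg with ⟨k, _, hk⟩
    exact h a (List.mem_of_getElem? hk)

-- the early-exit while loop, under min with the outer accumulator, is the full sum
lemma pv_while (sayac : List Int) (M b s : Int) (hb : 0 < b)
    (hnn : ∀ i : Int, 0 ≤ PySem.List.pyGetD sayac i 0) :
    ∀ (fuel : Nat) (i t : Int), (M + 1 - i).toNat ≤ fuel →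
      min s (pvWhileA sayac M b s fuel i t)
        = min s (t + ((PySem.List.pyRange i (M + 1)).map
            (fun k => PySem.List.pyGetD sayac k 0 *
              PySem.Int.mod (b - PySem.Int.mod k b) b)).sum) := by
  intro fuel
  induction fuel with
  | zero =>
    intro i t hfuel
    have hiM : M + 1 ≤ i := by omega
    rw [PySem.List.pyRange_one_eq_nil hiM]
    simp [pvWhileA]
  | succ fuel ih =>
    intro i t hfuel
    rw [pvWhileA]
    by_cases hcond : i ≤ M ∧ t < s
    · rw [if_pos hcond]
      rw [ih (i + 1) _ (by omega)]
      rw [PySem.List.pyRange_one_cons (by omega : i < M + 1)]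
      simp only [List.map_cons, List.sum_cons]
      ring_nf
    · rw [if_neg hcond]
      by_cases hiM : i ≤ M
      · have hts : s ≤ t := by omega
        have hsum : 0 ≤ ((PySem.List.pyRange i (M + 1)).map
            (fun k => PySem.List.pyGetD sayac k 0 *
              PySem.Int.mod (b - PySem.Int.mod k b) b)).sum := by
          apply List.sum_nonneg
          intro x hx
          rcases List.mem_map.mp hx with ⟨k, _, rfl⟩
          exact mul_nonneg (hnn k) (PySem.Int.mod_nonneg _ hb)
        omega
      · rw [PySem.List.pyRange_one_eq_nil (by omega : M + 1 ≤ i)]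
        simp

-- characterization of B's suffix-count array (built back-to-front)
lemma pv_kac (M : Int) (hM : 0 ≤ M) (cnt : Int → Int) :
    ∀ (k : Nat) (x : Int), x = M + 1 - (k : Int) → (k : Int) ≤ M →
      ((PySem.List.pyRange x (M + 1)).foldr
          (fun y g => PySem.List.pySetD g y (PySem.List.pyGetD g (y + 1) 0 + cnt y))
          (List.replicate (M + 2).toNat 0)).length = (M + 2).toNat ∧
      ∀ j : Int, 0 ≤ j → j ≤ M + 1 →
        PySem.List.pyGetD
            ((PySem.List.pyRange x (M + 1)).foldr
              (fun y g => PySem.List.pySetD g y (PySem.List.pyGetD g (y + 1) 0 + cnt y))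
              (List.replicate (M + 2).toNat 0)) j 0
          = if x ≤ j then ((PySem.List.pyRange j (M + 1)).map cnt).sum else 0 := by
  intro k
  induction k with
  | zero =>
    intro x hx _
    have hx' : x = M + 1 := by push_cast at hx; omega
    subst hx'
    rw [PySem.List.pyRange_one_eq_nil (le_refl (M + 1))]
    simp only [List.foldr_nil]
    refine ⟨List.length_replicate, ?_⟩
    intro j hj0 hj1
    rw [pv_getD_zero _ _ (fun x hx => (List.eq_of_mem_replicate hx))]
    split_ifs with h1
    · have : j = M + 1 := by omega
      subst this
      rw [PySem.List.pyRange_one_eq_nil (le_refl (M + 1))]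
      simp
    · rfl
  | succ k ih =>
    intro x hx hk
    push_cast at hx hk
    have hx1 : 1 ≤ x := by omega
    have hxM : x ≤ M := by omega
    obtain ⟨ihlen, ihget⟩ := ih (x + 1) (by omega) (by omega)
    rw [PySem.List.pyRange_one_cons (by omega : x < M + 1), List.foldr_cons]
    set H' := (PySem.List.pyRange (x + 1) (M + 1)).foldr
        (fun y g => PySem.List.pySetD g y (PySem.List.pyGetD g (y + 1) 0 + cnt y))
        (List.replicate (M + 2).toNat 0) with hH'
    refine ⟨by rw [PySem.List.length_pySetD, ihlen], ?_⟩
    intro j hj0 hj1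
    have hxn : x = ((x.toNat : Nat) : Int) := (Int.toNat_of_nonneg (by omega)).symm
    have hjn : j = ((j.toNat : Nat) : Int) := (Int.toNat_of_nonneg hj0).symm
    have hxlen : x.toNat < H'.length := by rw [ihlen]; omega
    rw [hxn, hjn, PySem.List.pyGetD_pySetD_natCast H' x.toNat j.toNat _ 0 hxlen,
      ← hxn, ← hjn]
    by_cases hjx : j = x
    · rw [if_pos (by omega : j.toNat = x.toNat)]
      rw [ihget (x + 1) (by omega) (by omega)]
      rw [if_pos (le_refl (x + 1)), hjx, if_pos (le_refl x)]
      rw [PySem.List.pyRange_one_cons (by omega : x < M + 1)]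
      simp only [List.map_cons, List.sum_cons]
      ring
    · rw [if_neg (by omega : ¬ j.toNat = x.toNat)]
      rw [ihget j hj0 hj1]
      split_ifs with h1 h2 h2 <;> first | rfl | omega

-- counting multiples of b below v
lemma pv_count_range (K : Nat) (b v : Int) (hb : 0 < b) (hv : 0 ≤ v) :
    ((List.range K).countP (fun k : Nat => decide (b * (k : Int) + 1 ≤ v)) : Int)
      = min (K : Int) (-(PySem.Int.floordiv (-v) b)) := by
  set q := -(PySem.Int.floordiv (-v) b) with hqdef
  obtain ⟨hq1, hq2⟩ := (PySem.Int.neg_floordiv_neg_eq_iff_of_pos hb).mp hqdef.symm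
  have hq0 : 0 ≤ q := by nlinarith
  induction K with
  | zero => simp; omega
  | succ K ih =>
    have hiff : (b * (K : Int) + 1 ≤ v) ↔ (K : Int) < q := by
      constructor
      · intro h
        by_contra hc
        have hc' : q ≤ (K : Int) := by omega
        have : q * b ≤ (K : Int) * b := mul_le_mul_of_nonneg_right hc' (le_of_lt hb)
        nlinarith
      · intro h
        have h' : (K : Int) ≤ q - 1 := by omega
        have : (K : Int) * b ≤ (q - 1) * b := mul_le_mul_of_nonneg_right h' (le_of_lt hb)
        nlinarith
    have hsplit : (List.range (K + 1)).countP (fun k : Nat => decide (b * (k : Int) + 1 ≤ v))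
        = ((List.range K).countP (fun k : Nat => decide (b * (k : Int) + 1 ≤ v)))
          + (if b * (K : Int) + 1 ≤ v then 1 else 0) := by
      rw [List.range_succ, List.countP_append]
      congr 1
      simp [List.countP_cons, List.countP_nil]
    rw [hsplit, Nat.cast_add, ih]
    have hite : (((if b * (K : Int) + 1 ≤ v then 1 else 0 : Nat)) : Int)
        = if b * (K : Int) + 1 ≤ v then (1 : Int) else 0 := by
      split_ifs <;> simp
    rw [hite]
    by_cases hc : b * (K : Int) + 1 ≤ v
    · have := hiff.mp hc
      rw [if_pos hc]
      omega
    · have hnc : ¬ (K : Int) < q := fun h => hc (hiff.mpr h)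
      rw [if_neg hc]
      omega

-- the per-value identity: b * ceil(v/b) - v is the rounding-up cost
lemma pv_pointwise (b v : Int) (hb : 0 < b) :
    b * (-(PySem.Int.floordiv (-v) b)) - v
      = PySem.Int.mod (b - PySem.Int.mod v b) b := by
  rw [PySem.Int.mod_eq_emod_of_pos hb, PySem.Int.mod_eq_emod_of_pos hb,
    PySem.Int.floordiv_eq_ediv_of_pos hb]
  have h1 : (b - v % b) % b = (-(v % b)) % b := by
    have h : b - v % b = -(v % b) + b * 1 := by ring
    rw [h, Int.add_mul_emod_self_left]
  have h2 : (-(v % b)) % b = (-v) % b := by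
    have h : -v = -(v % b) + b * (-(v / b)) := by
      have := Int.emod_add_mul_ediv v b
      linarith
    rw [h, Int.add_mul_emod_self_left]
  rw [h1, h2, Int.emod_def]
  ring

-- b * (#multiples t of b, 0 ≤ t < m, with t < v) - v = rounding-up cost, for 0 ≤ v ≤ m, b ≤ m
lemma pv_cv (b v m : Int) (hb : 2 ≤ b) (hbm : b ≤ m) (hv : 0 ≤ v) (hvm : v ≤ m) :
    b * ((PySem.List.pyRange 0 m b).countP (fun t => decide (t + 1 ≤ v)) : Int) - v
      = PySem.Int.mod (b - PySem.Int.mod v b) b := by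
  have hb0 : (0 : Int) < b := by omega
  have hKpos : (0 : Int) < m := by omega
  rw [PySem.List.pyRange_of_pos 0 m hb0, List.countP_map, if_pos hKpos]
  have hpred : ((List.range ((m - 0 + b - 1) / b).toNat).countP
        ((fun t => decide (t + 1 ≤ v)) ∘ (fun k : Nat => 0 + b * (k : Int))))
      = (List.range ((m - 0 + b - 1) / b).toNat).countP
        (fun k : Nat => decide (b * (k : Int) + 1 ≤ v)) := by
    apply List.countP_congr
    intro k _
    simp [Function.comp]
  rw [hpred, pv_count_range _ b v hb0 hv]
  set q := -(PySem.Int.floordiv (-v) b) with hqdef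
  obtain ⟨hq1, hq2⟩ := (PySem.Int.neg_floordiv_neg_eq_iff_of_pos hb0).mp hqdef.symm
  have hQnn : 0 ≤ (m - 0 + b - 1) / b := Int.ediv_nonneg (by omega) (le_of_lt hb0)
  have hcastK : ((((m - 0 + b - 1) / b).toNat : Nat) : Int) = (m - 0 + b - 1) / b :=
    Int.toNat_of_nonneg hQnn
  have hmQ : m ≤ ((m - 0 + b - 1) / b) * b := by
    have hdm := Int.emod_add_mul_ediv (m - 0 + b - 1) b
    have hr0 : 0 ≤ (m - 0 + b - 1) % b := Int.emod_nonneg _ (by omega)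
    have hr1 : (m - 0 + b - 1) % b < b := Int.emod_lt_of_pos _ hb0
    nlinarith
  have hqK : q ≤ (m - 0 + b - 1) / b := by nlinarith
  rw [hcastK, min_eq_right hqK]
  exact pv_pointwise b v hb0

-- ===== VERDICT (by name: the statement is the Claim_ definition above) =====
theorem kartPaketleri_spec : Claim_equal_kartPaketleri := by
  intro l _ hpre
  show kartPaketleri l = kartPaketleri_alt l
  obtain ⟨hne, hM0, hlow⟩ := hpre
  obtain ⟨M, hM⟩ : ∃ M, PySem.List.max? l (fun y => y) = some M := by
    cases hmx : PySem.List.max? l (fun y => y) with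
    | none => exact absurd ((PySem.List.max?_eq_none_iff l _).mp hmx) hne
    | some M => exact ⟨M, rfl⟩
  rw [pvMaxD, hM, Option.getD_some] at hM0 hlow
  have hle : ∀ v ∈ l, v ≤ M := fun v hv => PySem.List.max?_isMax hM v hv
  have hlen1 : ((M + 1).toNat : Int) = M + 1 := Int.toNat_of_nonneg (by omega)
  unfold kartPaketleri kartPaketleri_alt
  simp only [hM]
  rw [PySem.List.pyRepeat_singleton, PySem.List.pyRepeat_singleton,
    PySem.List.foldl_pyRange_zero_pyGetD' l (0 : Int)
      (fun s v => PySem.List.pySetD s v (PySem.List.pyGetD s v 0 + 1)),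
    pv_fold_wrap (M + 1) l
      (fun v hv => ⟨by have := hlow v hv; omega, by have := hle v hv; omega⟩)
      _ (by rw [List.length_replicate]; exact hlen1),
    PySem.List.pyRange_neg_one_eq_reverse, List.foldl_reverse]
  simp only [zero_add]
  set w : List Int := l.map (fun v => PySem.Int.mod v (M + 1)) with hwdef
  have hmem : ∀ v ∈ w, 0 ≤ v ∧ v ≤ M := by
    intro v hv
    rw [hwdef] at hv
    obtain ⟨u, _, rfl⟩ := List.mem_map.mp hv
    exact ⟨PySem.Int.mod_nonneg u (by omega),
      by have := PySem.Int.mod_lt u (by omega : (0 : Int) < M + 1); omega⟩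
  have hnonneg : ∀ v ∈ w, 0 ≤ v := fun v hv => (hmem v hv).1
  have hle' : ∀ v ∈ w, v ≤ M := fun v hv => (hmem v hv).2
  set say : List Int := w.foldl
      (fun s v => PySem.List.pySetD s v (PySem.List.pyGetD s v 0 + 1))
      (List.replicate (M + 1).toNat 0) with hsaydef
  set kac : List Int := (PySem.List.pyRange 1 (M + 1)).foldr
      (fun x g => PySem.List.pySetD g x
        (PySem.List.pyGetD g (x + 1) 0 + PySem.List.pyGetD say x 0))
      (List.replicate (M + 2).toNat 0) with hkacdef
  have hbound : ∀ v ∈ w, 0 ≤ v ∧ v < ((List.replicate (M + 1).toNat (0 : Int)).length : Int) := by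
    intro v hv
    rw [List.length_replicate, hlen1]
    exact ⟨hnonneg v hv, by have := hle' v hv; omega⟩
  obtain ⟨hslen, hsget0⟩ := pv_sayac w _ hbound
  have hrep0 : ∀ i : Int, PySem.List.pyGetD (List.replicate (M + 1).toNat (0 : Int)) i 0 = 0 :=
    fun i => pv_getD_zero _ _ (fun x hx => List.eq_of_mem_replicate hx)
  have hsget : ∀ k : Int, 0 ≤ k → k < M + 1 →
      PySem.List.pyGetD say k 0 = (w.count k : Int) := by
    intro k h0 h1
    rw [hsaydef, hsget0 k h0 (by rw [List.length_replicate, hlen1]; exact h1), hrep0]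
    ring
  have hsaymem : ∀ x ∈ say, 0 ≤ x := by
    intro x hx
    obtain ⟨j, hj, rfl⟩ := List.mem_iff_getElem.mp hx
    have hjlen : ((j : Nat) : Int) < M + 1 := by
      have h1 : say.length = (M + 1).toNat := by rw [hsaydef, hslen, List.length_replicate]
      omega
    have h2 := hsget j (by positivity) hjlen
    rw [PySem.List.pyGetD_eq_getElem say 0 (by positivity) (by
      have h1 : say.length = (M + 1).toNat := by rw [hsaydef, hslen, List.length_replicate]
      omega)] at h2
    simp only [Int.toNat_natCast] at h2
    rw [h2]
    positivity
  have hnn : ∀ i : Int, 0 ≤ PySem.List.pyGetD say i 0 := fun i => pv_getD_nonneg say i hsaymem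
  obtain ⟨hkaclen, hkacget⟩ :=
    pv_kac M hM0 (fun y => PySem.List.pyGetD say y 0) M.toNat 1 (by omega) (by omega)
  have hkacget' : ∀ j : Int, 0 ≤ j → j ≤ M + 1 →
      PySem.List.pyGetD kac j 0
        = if 1 ≤ j then ((PySem.List.pyRange j (M + 1)).map
            (fun y => PySem.List.pyGetD say y 0)).sum else 0 := by
    intro j h0 h1
    rw [hkacdef]
    simpa using hkacget j h0 h1
  have htoplam : (PySem.List.pyRange 1 (M + 1)).foldl
      (fun a x => a + x * PySem.List.pyGetD say x 0) 0 = w.sum := by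
    rw [PySem.List.foldl_add]
    have h1 : (PySem.List.pyRange 1 (M + 1)).map (fun x => x * PySem.List.pyGetD say x 0)
        = (PySem.List.pyRange 1 (M + 1)).map (fun x => (w.count x : Int) * x) := by
      apply List.map_congr_left
      intro x hx
      obtain ⟨hx0, hx1⟩ := PySem.List.mem_pyRange_one.mp hx
      rw [hsget x (by omega) hx1]
      ring
    have h3 := pv_regroup w (PySem.List.pyRange 0 (M + 1)) (fun k => k)
      (PySem.List.nodup_pyRange_one 0 (M + 1))
      (fun v hv => PySem.List.mem_pyRange_one.mpr ⟨hnonneg v hv, by have := hle' v hv; omega⟩)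
    rw [PySem.List.pyRange_one_cons (by omega : (0 : Int) < M + 1)] at h3
    simp only [List.map_cons, List.sum_cons, mul_zero, zero_add, List.map_id'] at h3
    rw [zero_add, h1, h3]
  rw [htoplam]
  apply PySem.List.foldl_congr_mem
  intro s b hbmem
  obtain ⟨hb2, hbM1⟩ := PySem.List.mem_pyRange_one.mp hbmem
  have hbM : b ≤ M := by omega
  rw [pv_while say M b s (by omega) hnn (M + 2).toNat 0 0 (by omega)]
  have hmapA : (PySem.List.pyRange 0 (M + 1)).map
      (fun k => PySem.List.pyGetD say k 0 * PySem.Int.mod (b - PySem.Int.mod k b) b)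
      = (PySem.List.pyRange 0 (M + 1)).map
        (fun k => (w.count k : Int) * PySem.Int.mod (b - PySem.Int.mod k b) b) := by
    apply List.map_congr_left
    intro k hk
    obtain ⟨hk0, hk1⟩ := PySem.List.mem_pyRange_one.mp hk
    rw [hsget k hk0 hk1]
  rw [hmapA, pv_regroup w _ _ (PySem.List.nodup_pyRange_one 0 (M + 1))
    (fun v hv => PySem.List.mem_pyRange_one.mpr ⟨hnonneg v hv, by have := hle' v hv; omega⟩)]
  rw [PySem.List.foldl_add]
  have hmapB : (PySem.List.pyRange 0 M b).map (fun t => PySem.List.pyGetD kac (t + 1) 0)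
      = (PySem.List.pyRange 0 M b).map
        (fun t => ((w.countP (fun v => decide (t + 1 ≤ v)) : Nat) : Int)) := by
    apply List.map_congr_left
    intro t ht
    obtain ⟨ht0, htM, _⟩ := (PySem.List.mem_pyRange_iff_of_pos (by omega : (0:Int) < b) t).mp ht
    rw [hkacget' (t + 1) (by omega) (by omega), if_pos (by omega)]
    have h1 : (PySem.List.pyRange (t + 1) (M + 1)).map (fun y => PySem.List.pyGetD say y 0)
        = (PySem.List.pyRange (t + 1) (M + 1)).map (fun y => (w.count y : Int)) := by
      apply List.map_congr_left
      intro y hy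
      obtain ⟨hy0, hy1⟩ := PySem.List.mem_pyRange_one.mp hy
      exact hsget y (by omega) hy1
    rw [h1, pv_sum_count w _ (PySem.List.nodup_pyRange_one _ _)]
    congr 1
    apply List.countP_congr
    intro v hv
    have h2 := hle' v hv
    simp only [decide_eq_true_eq]
    constructor
    · intro h
      exact (PySem.List.mem_pyRange_one.mp h).1
    · intro h
      exact PySem.List.mem_pyRange_one.mpr ⟨h, by omega⟩
  rw [hmapB]
  have hswap := pv_swap (PySem.List.pyRange 0 M b) w (fun t v => decide (t + 1 ≤ v))
  beta_reduce at hswap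
  rw [hswap]
  have hpoint : w.map (fun v => b *
        (((PySem.List.pyRange 0 M b).countP (fun t => decide (t + 1 ≤ v)) : Nat) : Int) - v)
      = w.map (fun v => PySem.Int.mod (b - PySem.Int.mod v b) b) := by
    apply List.map_congr_left
    intro v hv
    exact pv_cv b v M hb2 hbM (hnonneg v hv) (hle' v hv)
  have hsum2 : (w.map (fun v => b *
        (((PySem.List.pyRange 0 M b).countP (fun t => decide (t + 1 ≤ v)) : Nat) : Int) - v)).sum
      + w.sum
      = b * (w.map (fun v =>
          (((PySem.List.pyRange 0 M b).countP (fun t => decide (t + 1 ≤ v)) : Nat) : Int))).sum := by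
    have h3 := PySem.List.sum_map_add_int w (fun v => b *
        (((PySem.List.pyRange 0 M b).countP (fun t => decide (t + 1 ≤ v)) : Nat) : Int) - v)
      (fun v => v)
    have h4 : (w.map (fun v => (b *
        (((PySem.List.pyRange 0 M b).countP (fun t => decide (t + 1 ≤ v)) : Nat) : Int) - v)
          + v)).sum
        = b * (w.map (fun v =>
          (((PySem.List.pyRange 0 M b).countP (fun t => decide (t + 1 ≤ v)) : Nat) : Int))).sum := by
      rw [← List.sum_map_mul_left]
      apply congrArg List.sum
      apply List.map_congr_left
      intro v _
      ring
    have h5 : (w.map (fun v => v)).sum = w.sum := by simp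
    rw [h4] at h3
    omega
  have hfin : (w.map (fun k => PySem.Int.mod (b - PySem.Int.mod k b) b)).sum
      = b * (w.map (fun v =>
          (((PySem.List.pyRange 0 M b).countP (fun t => decide (t + 1 ≤ v)) : Nat) : Int))).sum
        - w.sum := by
    have h6 := congrArg List.sum hpoint
    omega
  rw [zero_add, zero_add, hfin]
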